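-- pv_equiv track=rewrite | github.com/iceout/aidd-plugin | skills/review/runtime/context_pack.py | _replace_first_list_item
-- ===== SOURCE A (Python) =====
-- def _replace_first_list_item(lines: list[str], heading: str, value: str) -> list[str]:
--     for idx, line in enumerate(lines):
--         if line.strip() != heading:
--             continue
--         for j in range(idx + 1, len(lines)):
--             if lines[j].lstrip().startswith("-"):
--                 lines[j] = f"- {value or 'n/a'}"
--                 return lines
--             if lines[j].startswith("## "):
--                 break
--         break
--     return lines
-- ===== SOURCE B (Python) =====
-- def _replace_first_list_item(lines: list[str], heading: str, value: str) -> list[str]: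
--     # Single sweep with an in-section flag, building a fresh output list (no in-place
--     # mutation; same return value as the nested-loop original).
--     out = []
--     in_section = False
--     for i, line in enumerate(lines):
--         if not in_section:
--             out.append(line)
--             in_section = line.strip() == heading
--             continue
--         if line.lstrip().startswith("-"):
--             return out + [f"- {value or 'n/a'}"] + lines[i + 1:]
--         if line.startswith("## "):
--             return out + lines[i:]
--         out.append(line)
--     return out
-- ===== Notes on version B (the rewrite author's own statement) =====
-- stated objective: alternative
-- what changed: Replaces A's index-based nested loops (find heading, then scan forward with range and in-place assignment) by a single structural recursion over the list that carries an in-section flag and rebuilds the list without mutation.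
import Mathlib
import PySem

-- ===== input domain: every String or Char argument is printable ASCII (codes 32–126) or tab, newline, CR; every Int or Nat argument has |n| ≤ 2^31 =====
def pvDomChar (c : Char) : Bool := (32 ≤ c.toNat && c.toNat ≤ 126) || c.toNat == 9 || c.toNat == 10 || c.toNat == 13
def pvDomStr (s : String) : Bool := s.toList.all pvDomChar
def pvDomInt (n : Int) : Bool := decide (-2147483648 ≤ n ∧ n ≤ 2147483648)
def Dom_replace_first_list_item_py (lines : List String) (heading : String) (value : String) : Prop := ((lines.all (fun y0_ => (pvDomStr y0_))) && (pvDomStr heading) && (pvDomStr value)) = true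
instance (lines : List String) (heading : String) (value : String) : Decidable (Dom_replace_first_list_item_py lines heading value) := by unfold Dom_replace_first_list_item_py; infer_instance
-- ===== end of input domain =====

-- B rebuilds the list by structural recursion with an in-section flag instead of A's
-- index-based nested loops; same return value (A mutates its argument in place, B does not:
-- the equivalence proved here is about the return value only).


-- ===== PORT A =====
-- inner loop: for j in range(idx+1, len(lines)): …
def pvAInner (lines : List String) (value : String) (j : Nat) : List String :=
  if h : j < lines.length then
    if PySem.Str.startswith (PySem.Str.lstrip lines[j]) "-" then
      lines.set j ("- " ++ (if value = "" then "n/a" else value))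
    else if PySem.Str.startswith lines[j] "## " then lines
    else pvAInner lines value (j + 1)
  else lines
termination_by lines.length - j

-- outer loop: for idx, line in enumerate(lines): …
def pvAOuter (lines : List String) (heading value : String) (idx : Nat) : List String :=
  if h : idx < lines.length then
    if PySem.Str.strip lines[idx] ≠ heading then pvAOuter lines heading value (idx + 1)
    else pvAInner lines value (idx + 1)
  else lines
termination_by lines.length - idx

def replace_first_list_item_py (lines : List String) (heading : String) (value : String) : List String :=
  pvAOuter lines heading value 0

-- ===== PORT B =====
-- the loop of Source B: accumulator `acc` = lines already emitted, flag = in_section;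
-- `rest` plays the role of lines[i:] / lines[i+1:]
def pvBGo (heading value : String) (acc : List String) : Bool → List String → List String
  | _, [] => acc
  | false, l :: rest => pvBGo heading value (acc ++ [l]) (PySem.Str.strip l == heading) rest
  | true, l :: rest =>
      if PySem.Str.startswith (PySem.Str.lstrip l) "-" then
        acc ++ [("- " ++ (if value = "" then "n/a" else value))] ++ rest
      else if PySem.Str.startswith l "## " then acc ++ l :: rest
      else pvBGo heading value (acc ++ [l]) true rest

def replace_first_list_item_py_alt (lines : List String) (heading : String) (value : String) : List String :=
  pvBGo heading value [] false lines

-- ===== PRECONDITION & SPEC =====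
def Spec_replace_first_list_item_py (lines : List String) (heading : String) (value : String) (out : List String) : Prop := out = replace_first_list_item_py_alt lines heading value
instance (lines : List String) (heading : String) (value : String) (out : List String) : Decidable (Spec_replace_first_list_item_py lines heading value out) := by unfold Spec_replace_first_list_item_py; infer_instance

-- ===== CLAIM (what is proved, stated in full; the proofs are below) =====
def Claim_equal_replace_first_list_item_py : Prop := ∀ (lines : List String) (heading : String) (value : String), Dom_replace_first_list_item_py lines heading value → Spec_replace_first_list_item_py lines heading value (replace_first_list_item_py lines heading value)

-- ===== LEMMAS AND PROOFS =====

-- proof-side view of B: the same recursion without the accumulator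
def pvCore (heading value : String) : Bool → List String → List String
  | _, [] => []
  | false, l :: rest => l :: pvCore heading value (PySem.Str.strip l == heading) rest
  | true, l :: rest =>
      if PySem.Str.startswith (PySem.Str.lstrip l) "-" then
        ("- " ++ (if value = "" then "n/a" else value)) :: rest
      else if PySem.Str.startswith l "## " then l :: rest
      else l :: pvCore heading value true rest

theorem pvBGo_eq_core (heading value : String) (ls : List String) :
    ∀ (acc : List String) (flag : Bool),
      pvBGo heading value acc flag ls = acc ++ pvCore heading value flag ls := by
  induction ls with
  | nil => intro acc flag; cases flag <;> simp [pvBGo, pvCore]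
  | cons l rest ih =>
    intro acc flag
    cases flag with
    | false => rw [pvBGo, pvCore, ih]; simp
    | true =>
      rw [pvBGo, pvCore]
      split_ifs with h1 h2 <;> simp [ih]

theorem pvTakeSucc {α : Type} (l : List α) (n : Nat) (h : n < l.length) (X : List α) :
    l.take (n + 1) ++ X = l.take n ++ l[n] :: X := by
  rw [List.take_succ_eq_append_getElem h, List.append_assoc, List.singleton_append]

theorem pvAInner_eq (lines : List String) (value heading : String) (j : Nat) :
    pvAInner lines value j = lines.take j ++ pvCore heading value true (lines.drop j) := by
  induction j using pvAInner.induct (lines := lines) with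
  | case1 j h h1 =>
    rw [pvAInner, dif_pos h, if_pos h1, List.drop_eq_getElem_cons h, pvCore, if_pos h1,
      List.set_eq_take_append_cons_drop, if_pos h]
  | case2 j h h1 h2 =>
    rw [pvAInner, dif_pos h, if_neg h1, if_pos h2, List.drop_eq_getElem_cons h, pvCore,
      if_neg h1, if_pos h2, ← List.drop_eq_getElem_cons h, List.take_append_drop]
  | case3 j h h1 h2 ih =>
    rw [pvAInner, dif_pos h, if_neg h1, if_neg h2, ih, List.drop_eq_getElem_cons h, pvCore,
      if_neg h1, if_neg h2, pvTakeSucc lines j h]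
  | case4 j h =>
    rw [pvAInner, dif_neg h]
    simp [List.drop_eq_nil_of_le (by omega : lines.length ≤ j),
      List.take_of_length_le (by omega : lines.length ≤ j), pvCore]

theorem pvAOuter_eq (lines : List String) (heading value : String) (idx : Nat) :
    pvAOuter lines heading value idx = lines.take idx ++ pvCore heading value false (lines.drop idx) := by
  induction idx using pvAOuter.induct (lines := lines) (heading := heading) with
  | case1 idx h h1 ih =>
    have hb : (PySem.Str.strip lines[idx] == heading) = false := by
      simpa [beq_eq_false_iff_ne] using h1
    rw [pvAOuter, dif_pos h, if_pos h1, ih, List.drop_eq_getElem_cons h, pvCore, hb,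
      pvTakeSucc lines idx h]
  | case2 idx h h1 =>
    have hb : (PySem.Str.strip lines[idx] == heading) = true := by
      simpa using not_not.mp h1
    rw [pvAOuter, dif_pos h, if_neg h1, pvAInner_eq lines value heading (idx + 1),
      List.drop_eq_getElem_cons h, pvCore, hb, pvTakeSucc lines idx h]
  | case3 idx h =>
    rw [pvAOuter, dif_neg h]
    simp [List.drop_eq_nil_of_le (by omega : lines.length ≤ idx),
      List.take_of_length_le (by omega : lines.length ≤ idx), pvCore]

-- ===== VERDICT (by name: the statement is the Claim_ definition above) =====
theorem replace_first_list_item_py_spec : Claim_equal_replace_first_list_item_py := by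
  intro lines heading value _
  unfold Spec_replace_first_list_item_py replace_first_list_item_py replace_first_list_item_py_alt
  rw [pvBGo_eq_core]
  simpa using pvAOuter_eq lines heading value 0
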